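-- pv_equiv track=rewrite | github.com/Shujun-He/RibonanzaNet2 | finetune_v8.py | mask_diagonal
-- ===== SOURCE A (Python) =====
-- def mask_diagonal(matrix, mask_value=0):
--     matrix=matrix.copy()
--     n = len(matrix)
--     for i in range(n):
--         for j in range(n):
--             if abs(i - j) < 3:
--                 matrix[i][j] = mask_value
--     return matrix
-- ===== SOURCE B (Python) =====
-- def mask_diagonal(matrix, mask_value=0):
--     matrix = matrix.copy()
--     n = len(matrix)
--     for i, row in enumerate(matrix):
--         lo = 0 if i < 2 else i - 2
--         hi = min(n, i + 3)
--         row[lo:hi] = [mask_value] * (hi - lo)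
--     return matrix
-- ===== Notes on version B (the rewrite author's own statement) =====
-- stated objective: faster
-- what changed: Replaces the full n×n nested scan with abs() tests by a single pass over the rows that splices the constant band [max(0,i-2), min(n,i+3)) into row i with one slice assignment, touching only O(1) cells per row instead of n.
import Mathlib
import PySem

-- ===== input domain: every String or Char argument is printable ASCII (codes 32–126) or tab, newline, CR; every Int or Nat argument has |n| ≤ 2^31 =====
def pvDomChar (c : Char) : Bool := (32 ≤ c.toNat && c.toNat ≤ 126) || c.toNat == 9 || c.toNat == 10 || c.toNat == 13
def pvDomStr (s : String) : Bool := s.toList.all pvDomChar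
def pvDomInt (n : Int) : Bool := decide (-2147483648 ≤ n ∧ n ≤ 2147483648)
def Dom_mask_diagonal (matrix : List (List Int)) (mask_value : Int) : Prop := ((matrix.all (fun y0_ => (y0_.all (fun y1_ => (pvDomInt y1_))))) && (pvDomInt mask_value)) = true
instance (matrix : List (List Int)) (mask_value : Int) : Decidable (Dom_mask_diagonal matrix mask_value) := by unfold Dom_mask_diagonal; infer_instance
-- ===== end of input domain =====

-- B replaces A's full n×n scan with one slice splice of the band per row (measured faster).
-- A mutates the inner rows of its (shallow-copied) argument in place and B does the same in
-- Python; the equivalence proved here is about the RETURN value.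

-- ===== PORT A =====
def mask_diagonal (matrix : List (List Int)) (mask_value : Int) : List (List Int) :=
  let m := matrix                       -- matrix = matrix.copy()
  let n : Int := m.length
  (PySem.List.pyRange 0 n 1).foldl (fun acc i =>
    (PySem.List.pyRange 0 n 1).foldl (fun acc2 j =>
      if (i - j).natAbs < 3 then        -- abs(i - j) < 3
        acc2.modify i.toNat (fun row => row.set j.toNat mask_value)  -- matrix[i][j] = mask_value (in range under Pre_)
      else acc2) acc) m

-- ===== PORT B =====
def mask_diagonal_alt (matrix : List (List Int)) (mask_value : Int) : List (List Int) :=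
  let n := matrix.length
  matrix.mapIdx (fun i row =>           -- for i, row in enumerate(matrix): i ≥ 0, so Nat index is exact
    let lo := if i < 2 then 0 else i - 2
    let hi := min n (i + 3)
    row.take lo ++ List.replicate (hi - lo) mask_value ++ row.drop hi)  -- row[lo:hi] = [mask_value]*(hi-lo)

-- ===== PRECONDITION & SPEC =====
-- Pre_ excludes exactly the ragged matrices on which A raises IndexError: some row i is
-- shorter than the band's right end min(n, i+3).
def Pre_mask_diagonal (matrix : List (List Int)) (mask_value : Int) : Prop :=
  ∀ (k : Nat) (h : k < matrix.length), min matrix.length (k + 3) ≤ matrix[k].length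
instance (matrix : List (List Int)) (mask_value : Int) : Decidable (Pre_mask_diagonal matrix mask_value) := by unfold Pre_mask_diagonal; infer_instance
def pvWitness_mask_diagonal : List (List Int) × Int := ([[1, 2, 3], [4, 5, 6], [7, 8, 9]], 0)

def Spec_mask_diagonal (matrix : List (List Int)) (mask_value : Int) (out : List (List Int)) : Prop := out = mask_diagonal_alt matrix mask_value
instance (matrix : List (List Int)) (mask_value : Int) (out : List (List Int)) : Decidable (Spec_mask_diagonal matrix mask_value out) := by unfold Spec_mask_diagonal; infer_instance

-- ===== CLAIM (what is proved, stated in full; the proofs are below) =====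
def Claim_equal_mask_diagonal : Prop := ∀ (matrix : List (List Int)) (mask_value : Int), Dom_mask_diagonal matrix mask_value → Pre_mask_diagonal matrix mask_value → Spec_mask_diagonal matrix mask_value (mask_diagonal matrix mask_value)


-- ===== LEMMAS AND PROOFS =====

-- two modifications at the same index compose
lemma pv_modify_modify (l : List (List Int)) (i : Nat) (f g : List Int → List Int) :
    (l.modify i f).modify i g = l.modify i (fun a => g (f a)) := by
  apply List.ext_getElem?
  intro j
  simp only [List.getElem?_modify]
  cases l[j]? with
  | none => rfl
  | some a => by_cases h : i = j <;> simp [h]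

-- a fold whose every step modifies the SAME outer index i collapses to one modify
lemma pv_foldl_modify_same {α : Type} (i : Nat) (P : α → Prop) [DecidablePred P]
    (g : α → List Int → List Int) :
    ∀ (L : List α) (acc : List (List Int)),
      L.foldl (fun a j => if P j then a.modify i (fun r => g j r) else a) acc
        = acc.modify i (fun row => L.foldl (fun r j => if P j then g j r else r) row) := by
  intro L
  induction L with
  | nil => intro acc; exact (List.modify_id i acc).symm
  | cons x L ih =>
    intro acc
    by_cases h : P x
    · simp only [List.foldl_cons, if_pos h, ih, pv_modify_modify]
    · simp only [List.foldl_cons, if_neg h, ih]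

-- a fold over range n of modify-at-i acts independently on every index
lemma pv_foldl_outer (f : Nat → List Int → List Int) :
    ∀ (n : Nat) (m : List (List Int)) (k : Nat),
      ((List.range n).foldl (fun acc i => acc.modify i (fun r => f i r)) m)[k]?
        = if k < n then m[k]?.map (f k) else m[k]? := by
  intro n
  induction n with
  | zero => intro m k; simp
  | succ n ih =>
    intro m k
    rw [List.range_succ, List.foldl_append]
    simp only [List.foldl_cons, List.foldl_nil]
    rw [List.getElem?_modify, ih]
    by_cases hk : n = k
    · subst hk
      simp
    · by_cases hk2 : k < n
      · simp only [if_pos hk2, if_pos (by omega : k < n + 1)]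
        cases m[k]? <;> simp [hk]
      · simp only [if_neg hk2, if_neg (by omega : ¬ k < n + 1)]
        cases m[k]? <;> simp [hk]

lemma pv_length_foldl_set (P : Nat → Prop) [DecidablePred P] (v : Int) :
    ∀ (L : List Nat) (row : List Int),
      (L.foldl (fun r j => if P j then r.set j v else r) row).length = row.length := by
  intro L
  induction L with
  | nil => intro row; rfl
  | cons x L ih =>
    intro row
    by_cases h : P x <;> simp [h, ih]

-- elementwise description of the band-setting fold
lemma pv_foldl_set_getElem? (P : Nat → Prop) [DecidablePred P] (v : Int) :
    ∀ (n : Nat) (row : List Int) (t : Nat),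
      ((List.range n).foldl (fun r j => if P j then r.set j v else r) row)[t]?
        = if t < n ∧ P t then row[t]?.map (fun _ => v) else row[t]? := by
  intro n
  induction n with
  | zero => intro row t; simp
  | succ n ih =>
    intro row t
    rw [List.range_succ, List.foldl_append]
    simp only [List.foldl_cons, List.foldl_nil]
    by_cases hP : P n
    · rw [if_pos hP, List.getElem?_set, pv_length_foldl_set, ih]
      by_cases ht : n = t
      · subst ht
        rw [if_pos rfl, if_pos (⟨by omega, hP⟩ : n < n + 1 ∧ P n)]
        by_cases hl : n < row.length
        · rw [if_pos hl, List.getElem?_eq_getElem hl]; rfl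
        · rw [if_neg hl, List.getElem?_eq_none (by omega)]; rfl
      · rw [if_neg ht]
        by_cases hc : t < n ∧ P t
        · rw [if_pos hc, if_pos ⟨by omega, hc.2⟩]
        · rw [if_neg hc, if_neg (by rintro ⟨h1, h2⟩; exact hc ⟨by omega, h2⟩)]
    · rw [if_neg hP, ih]
      by_cases hc : t < n ∧ P t
      · rw [if_pos hc, if_pos ⟨by omega, hc.2⟩]
      · rw [if_neg hc, if_neg ?_]
        rintro ⟨h1, h2⟩
        by_cases ht : t = n
        · exact hP (ht ▸ h2)
        · exact hc ⟨by omega, h2⟩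

-- per-row: the band-setting fold over range n equals the take/replicate/drop splice
lemma pv_row_eq (n k : Nat) (v : Int) (row : List Int) (hk : k < n)
    (hlen : min n (k + 3) ≤ row.length) :
    (List.range n).foldl (fun r (j : Nat) => if ((k : Int) - (j : Int)).natAbs < 3 then r.set j v else r) row
      = row.take (if k < 2 then 0 else k - 2)
        ++ List.replicate (min n (k + 3) - (if k < 2 then 0 else k - 2)) v
        ++ row.drop (min n (k + 3)) := by
  have hlo : (if k < 2 then 0 else k - 2) = k - 2 := by split <;> omega
  rw [hlo]
  apply List.ext_getElem?
  intro t
  rw [pv_foldl_set_getElem?]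
  have hltake : (row.take (k - 2)).length = k - 2 := by
    simp [List.length_take]; omega
  have hl12 : (row.take (k - 2) ++ List.replicate (min n (k + 3) - (k - 2)) v).length
      = min n (k + 3) := by
    simp [List.length_append, List.length_take, List.length_replicate]; omega
  by_cases h1 : t < k - 2
  · rw [if_neg (by rintro ⟨ha, hb⟩; omega)]
    rw [List.getElem?_append_left (by rw [hl12]; omega)]
    rw [List.getElem?_append_left (by rw [hltake]; omega)]
    rw [List.getElem?_take, if_pos h1]
  · by_cases h2 : t < min n (k + 3)
    · rw [if_pos ⟨by omega, by omega⟩]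
      rw [List.getElem?_append_left (by rw [hl12]; omega)]
      rw [List.getElem?_append_right (by rw [hltake]; omega), hltake]
      rw [List.getElem?_replicate, if_pos (by omega)]
      rw [List.getElem?_eq_getElem (by omega : t < row.length)]
      rfl
    · rw [if_neg (by rintro ⟨ha, hb⟩; omega)]
      rw [List.getElem?_append_right (by rw [hl12]; omega), hl12]
      rw [List.getElem?_drop]
      congr 1
      omega

-- ===== VERDICT (by name: the statement is the Claim_ definition above) =====
theorem mask_diagonal_spec : Claim_equal_mask_diagonal := by
  intro matrix mask_value _ hpre
  simp only [Spec_mask_diagonal, mask_diagonal, mask_diagonal_alt]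
  rw [PySem.List.pyRange_one]
  simp only [sub_zero, Int.toNat_natCast, List.foldl_map, zero_add]
  have hinner : ∀ (kk : Nat) (acc : List (List Int)),
      (List.range matrix.length).foldl
        (fun a (j : Nat) => if ((kk : Int) - (j : Int)).natAbs < 3
          then a.modify kk (fun r => r.set j mask_value) else a) acc
        = acc.modify kk (fun row => (List.range matrix.length).foldl
            (fun r (j : Nat) => if ((kk : Int) - (j : Int)).natAbs < 3 then r.set j mask_value else r) row) :=
    fun kk acc => pv_foldl_modify_same kk (fun j : Nat => ((kk : Int) - (j : Int)).natAbs < 3)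
      (fun j r => r.set j mask_value) (List.range matrix.length) acc
  simp only [hinner]
  apply List.ext_getElem?
  intro k
  rw [pv_foldl_outer, List.getElem?_mapIdx]
  by_cases hk : k < matrix.length
  · rw [if_pos hk, List.getElem?_eq_getElem hk]
    simp only [Option.map_some]
    congr 1
    exact pv_row_eq matrix.length k mask_value matrix[k] hk (hpre k hk)
  · rw [if_neg hk, List.getElem?_eq_none (by omega)]
    rfl
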